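-- pv_equiv track=rewrite | github.com/luigifusco/pokeemeraldplus | randomizer/randomize.py | _compute_depths
-- ===== SOURCE A (Python) =====
-- def _find_cycles(mapping: dict[str, str]) -> list[list[str]]:
--     """Return list of cycles in the functional graph, each in traversal order."""
--     state: dict[str, int] = {}
--     cycles: list[list[str]] = []
--     for start in mapping:
--         if start in state:
--             continue
--         path: list[str] = []
--         pos: dict[str, int] = {}
--         node: str | None = start
--         while node is not None and node not in state:
--             state[node] = 1
--             pos[node] = len(path)
--             path.append(node)
--             node = mapping.get(node)
--         if node is not None and state.get(node) == 1:
--             cycles.append(path[pos[node]:])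
--         for n in path:
--             state[n] = 2
--     return cycles
--
-- def _compute_depths(
--     mapping: dict[str, str], cycles: list[list[str]] | None = None
-- ) -> dict[str, int]:
--     """For every node, number of edges to the first cycle node it reaches.
--
--     Cycle nodes have depth 0. Off-cycle nodes inherit depth(target)+1.
--     Every node reaches a cycle in a finite functional graph, so this
--     terminates for all inputs.
--     """
--     if cycles is None:
--         cycles = _find_cycles(mapping)
--     on_cycle = {n for c in cycles for n in c}
--     depth: dict[str, int] = {n: 0 for n in on_cycle}
--     # Iterative resolution: walk from each node until we hit an already
--     # known depth, then back-fill the walked prefix.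
--     for start in mapping:
--         if start in depth:
--             continue
--         path: list[str] = []
--         cur: str | None = start
--         while cur is not None and cur not in depth:
--             path.append(cur)
--             cur = mapping.get(cur)
--         base = depth[cur] if cur is not None else 0
--         for i, node in enumerate(reversed(path)):
--             depth[node] = base + i + 1
--     return depth
-- ===== SOURCE B (Python) =====
-- def _find_cycles(mapping):
--     """Return list of cycles in the functional graph, each in traversal order."""
--     state = {}
--     cycles = []
--     for start in mapping:
--         if start in state:
--             continue
--         path = []
--         pos = {}
--         node = start
--         while node is not None and node not in state:
--             state[node] = 1
--             pos[node] = len(path)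
--             path.append(node)
--             node = mapping.get(node)
--         if node is not None and state.get(node) == 1:
--             cycles.append(path[pos[node]:])
--         for n in path:
--             state[n] = 2
--     return cycles
--
-- def _compute_depths(mapping, cycles=None):
--     if cycles is None:
--         cycles = _find_cycles(mapping)
--     depth = {}
--     for c in cycles:
--         for n in c:
--             depth[n] = 0
--     # Explicit-stack memoised evaluation: depth(n) = depth(mapping[n]) + 1,
--     # depth(n) = 1 when n has no target; no path list, no base/enumerate backfill.
--     for start in mapping:
--         stack = [start]
--         while stack:
--             n = stack[-1]
--             if n in depth:
--                 stack.pop()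
--                 continue
--             t = mapping.get(n)
--             if t is None:
--                 depth[n] = 1
--                 stack.pop()
--             elif t in depth:
--                 depth[n] = depth[t] + 1
--                 stack.pop()
--             else:
--                 stack.append(t)
--     return depth
-- ===== Notes on version B (the rewrite author's own statement) =====
-- stated objective: alternative
-- what changed: A resolves each start by collecting the whole walked path in a list, reading one base depth, and arithmetically back-filling base+i+1 over enumerate(reversed(path)); B replaces that with an explicit-stack memoised evaluator that keeps no path list and no index arithmetic: it pushes unresolved nodes and on the way back assigns depth[n] = depth[mapping[n]] + 1 (1 at a missing target), and seeds cycle nodes by direct dict writes instead of a set comprehension.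
import Mathlib
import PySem

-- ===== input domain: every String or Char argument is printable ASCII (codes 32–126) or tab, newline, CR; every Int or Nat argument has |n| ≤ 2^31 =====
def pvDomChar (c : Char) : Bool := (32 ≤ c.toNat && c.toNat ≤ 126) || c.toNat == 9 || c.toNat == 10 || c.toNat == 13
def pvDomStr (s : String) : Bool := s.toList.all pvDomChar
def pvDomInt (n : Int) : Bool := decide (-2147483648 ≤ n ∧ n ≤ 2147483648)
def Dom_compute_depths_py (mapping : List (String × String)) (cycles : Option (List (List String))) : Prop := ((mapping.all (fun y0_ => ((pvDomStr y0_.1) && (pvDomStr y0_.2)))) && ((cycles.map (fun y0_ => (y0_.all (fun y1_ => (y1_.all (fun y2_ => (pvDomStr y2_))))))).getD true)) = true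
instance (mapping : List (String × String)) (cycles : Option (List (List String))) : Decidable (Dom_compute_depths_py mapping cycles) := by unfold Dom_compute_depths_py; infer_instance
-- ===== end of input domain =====

-- B replaces A's walk-then-arithmetic-backfill resolution by an explicit-stack memoised
-- evaluator assigning depth[n] = depth[target] + 1; same cost (objective: alternative).
-- The output dict's insertion order downstream of Python's hash-ordered set iteration is
-- not modelled: both ports use first-occurrence order (dict outputs compared as dicts).

-- ===== PORT A =====
-- helper _find_cycles (same-module helper, called verbatim by both A's and B's Python
-- when cycles is None; ported once, used by both ports).  The inner while adds a fresh
-- node to `state` each iteration and every walked node lies in {start} ∪ values(m), so it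
-- runs at most m.size+1 times; fuel m.size+2 is never exhausted.
def find_cycles_loop (m : PySem.Dict String String) :
    Nat → PySem.Dict String Int → PySem.Dict String Int → List String → Option String →
    (PySem.Dict String Int × PySem.Dict String Int × List String × Option String)
  | _, state, pos, path, none => (state, pos, path, none)
  | fuel, state, pos, path, some n =>
    if state.contains n then (state, pos, path, some n)
    else match fuel with
      | 0 => (state, pos, path, some n)
      | f + 1 =>
        find_cycles_loop m f (state.insert n 1) (pos.insert n (path.length : Int))
          (path ++ [n]) (m.get? n)

def find_cycles (m : PySem.Dict String String) : List (List String) :=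
  (m.keys.foldl (fun (acc : PySem.Dict String Int × List (List String)) start =>
    if acc.1.contains start then acc
    else
      let r := find_cycles_loop m (m.size + 2) acc.1 PySem.Dict.empty [] (some start)
      let cycles :=
        match r.2.2.2 with
        | some n =>
          if r.1.get? n = some 1 then
            acc.2 ++ [PySem.List.slice r.2.2.1 (some (r.2.1.getD n 0)) none]
          else acc.2
        | none => acc.2
      (r.2.2.1.foldl (fun st x => st.insert x 2) r.1, cycles)) (PySem.Dict.empty, [])).2

-- A's inner while.  The `c ∈ path` guard and the fuel only totalise the loop: when either
-- fires before a natural stop the Python loops forever (the ports return a value there too).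
def walkA (m : PySem.Dict String String) :
    Nat → PySem.Dict String Int → List String → Option String → List String × Option String
  | _, _, path, none => (path, none)
  | fuel, d, path, some c =>
    if d.contains c then (path, some c)
    else if c ∈ path then (path, some c)
    else match fuel with
      | 0 => (path, some c)
      | f + 1 => walkA m f d (path ++ [c]) (m.get? c)

-- `for i, node in enumerate(reversed(path)): depth[node] = base + i + 1`
def backfillA (d : PySem.Dict String Int) (path : List String) (base : Int) :
    PySem.Dict String Int :=
  (PySem.List.enumerate path.reverse 0).foldl (fun d p => d.insert p.2 (base + p.1 + 1)) d

def compute_depths_py (mapping : List (String × String)) (cycles : Option (List (List String))) : List (String × Int) :=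
  let m := PySem.Dict.ofList mapping
  let cs := match cycles with | some cs => cs | none => find_cycles m
  let on_cycle : PySem.Set String := PySem.Set.ofList cs.flatten
  let depth0 := on_cycle.foldl (fun (d : PySem.Dict String Int) n => d.insert n 0) PySem.Dict.empty
  (m.keys.foldl (fun d start =>
    if d.contains start then d
    else
      let r := walkA m (m.size + 2) d [] (some start)
      backfillA d r.1 (match r.2 with | some c => d.getD c 0 | none => 0)) depth0).items

-- ===== PORT B =====
-- B's inner while over the explicit stack (head of the list = top of the stack).
-- The `t ∈ stack` guard and the fuel (consumed only on push) totalise the loop exactly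
-- where Python B loops forever (the ports return a value there too); their branches repeat the preceding
-- assign-and-pop formula.
def loopB (m : PySem.Dict String String) :
    Nat → PySem.Dict String Int → List String → PySem.Dict String Int
  | _, d, [] => d
  | fuel, d, n :: rest =>
    if d.contains n then loopB m fuel d rest
    else match m.get? n with
      | none => loopB m fuel (d.insert n 1) rest
      | some t =>
        if d.contains t then loopB m fuel (d.insert n (d.getD t 0 + 1)) rest
        else if t ∈ n :: rest then loopB m fuel (d.insert n (d.getD t 0 + 1)) rest
        else match fuel with
          | 0 => loopB m 0 (d.insert n (d.getD t 0 + 1)) rest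
          | f + 1 => loopB m f d (t :: n :: rest)
  termination_by fuel _ stack => (fuel, stack.length)

def compute_depths_py_alt (mapping : List (String × String)) (cycles : Option (List (List String))) : List (String × Int) :=
  let m := PySem.Dict.ofList mapping
  let cs := match cycles with | some cs => cs | none => find_cycles m
  let depth0 := cs.foldl (fun d c =>
    c.foldl (fun (d : PySem.Dict String Int) n => d.insert n 0) d) PySem.Dict.empty
  (m.keys.foldl (fun d start => loopB m (m.size + 1) d [start]) depth0).items

-- ===== PRECONDITION & SPEC =====
-- No Pre_: the ports are total and equal on every input.  On inputs where the Pythons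
-- loop forever (an explicitly passed `cycles` list missing a cycle some key runs into)
-- the fuelled ports totalise the divergent loops in lockstep and still agree.
def Spec_compute_depths_py (mapping : List (String × String)) (cycles : Option (List (List String))) (out : List (String × Int)) : Prop := out = compute_depths_py_alt mapping cycles
instance (mapping : List (String × String)) (cycles : Option (List (List String))) (out : List (String × Int)) : Decidable (Spec_compute_depths_py mapping cycles out) := by unfold Spec_compute_depths_py; infer_instance

-- ===== CLAIM (what is proved, stated in full; the proofs are below) =====
def Claim_equal_compute_depths_py : Prop := ∀ (mapping : List (String × String)) (cycles : Option (List (List String))), Dom_compute_depths_py mapping cycles → Spec_compute_depths_py mapping cycles (compute_depths_py mapping cycles)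

-- ===== LEMMAS AND PROOFS =====

-- ---- seeding: {n: 0 for n in set(flat)} (A) = writing 0 for every n in flat (B) ----

theorem ins0_get?_of_mem (L : List String) (d : PySem.Dict String Int) (x : String)
    (hx : x ∈ L) :
    (L.foldl (fun d n => d.insert n 0) d).get? x = some 0 := by
  induction L using List.reverseRecOn generalizing d with
  | nil => cases hx
  | append_singleton L y ih =>
    rw [List.foldl_append]
    simp only [List.foldl_cons, List.foldl_nil]
    by_cases hxy : x = y
    · subst hxy; exact PySem.Dict.get?_insert_self _ _ _
    · rw [PySem.Dict.get?_insert_of_ne _ _ hxy]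
      rcases List.mem_append.1 hx with h | h
      · exact ih _ h
      · simp at h; exact absurd h hxy

theorem insert_zero_self (d : PySem.Dict String Int) (x : String)
    (hn : d.keys.Nodup) (h : d.get? x = some 0) : d.insert x 0 = d := by
  have hc : d.contains x = true := by
    rw [PySem.Dict.contains_eq_isSome_get?, h]; rfl
  apply PySem.Dict.ext
  rw [PySem.Dict.items_insert_of_contains _ _ hc]
  have : ∀ p ∈ d.items, (fun p : String × Int => if p.1 == x then (x, (0 : Int)) else p) p = p := by
    intro p hp
    by_cases hpx : p.1 = x
    · have hget : d.get? p.1 = some p.2 := PySem.Dict.get?_of_mem_items _ hp hn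
      rw [hpx, h] at hget
      have h2 : (0 : Int) = p.2 := by injection hget
      simp only [hpx, beq_self_eq_true, if_true]
      rw [← hpx, h2]
    · simp [hpx]
  rw [List.map_congr_left this]
  simp

theorem seed_eq (L : List String) (d : PySem.Dict String Int) (hn : d.keys.Nodup) :
    (PySem.Set.ofList L).foldl (fun d n => d.insert n 0) d
      = L.foldl (fun d n => d.insert n 0) d := by
  induction L using List.reverseRecOn generalizing d with
  | nil => rfl
  | append_singleton L x ih =>
    have hof : PySem.Set.ofList (L ++ [x]) = PySem.Set.add (PySem.Set.ofList L) x := by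
      rw [PySem.Set.ofList_eq_foldl, PySem.Set.ofList_eq_foldl, List.foldl_append]
      rfl
    rw [List.foldl_append, hof]
    simp only [List.foldl_cons, List.foldl_nil]
    by_cases hmem : x ∈ L
    · have hmem' : x ∈ PySem.Set.ofList L := (PySem.Set.mem_ofList L x).2 hmem
      have hadd : PySem.Set.add (PySem.Set.ofList L) x = PySem.Set.ofList L := by
        simp [PySem.Set.add, hmem']
      rw [hadd, ih d hn]
      exact (insert_zero_self _ x
        (PySem.Dict.nodup_keys_foldl_insert L _ d hn) (ins0_get?_of_mem L d x hmem)).symm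
    · have hmem' : x ∉ PySem.Set.ofList L := fun h => hmem ((PySem.Set.mem_ofList L x).1 h)
      have hadd : PySem.Set.add (PySem.Set.ofList L) x = PySem.Set.ofList L ++ [x] := by
        simp [PySem.Set.add, hmem']
      rw [hadd, List.foldl_append, ih d hn]
      simp only [List.foldl_cons, List.foldl_nil]

theorem seed_eq_flatten (cs : List (List String)) :
    (PySem.Set.ofList cs.flatten).foldl (fun d n => d.insert n 0) PySem.Dict.empty
      = cs.foldl (fun d c => c.foldl (fun (d : PySem.Dict String Int) n => d.insert n 0) d)
          PySem.Dict.empty := by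
  rw [seed_eq _ _ (by simp [PySem.Dict.keys, PySem.Dict.empty]), List.foldl_flatten]

-- ---- the chain-links predicate for the accumulated walk prefix ----

def Links (m : PySem.Dict String String) : List String → String → Prop
  | [], _ => True
  | [a], e => m.get? a = some e
  | a :: b :: l, e => m.get? a = some b ∧ Links m (b :: l) e

theorem links_append_singleton (m : PySem.Dict String String) (p : List String)
    (c e : String) :
    Links m (p ++ [c]) e ↔ Links m p c ∧ m.get? c = some e := by
  induction p with
  | nil => simp [Links]
  | cons a p ih =>
    cases p with
    | nil => simp [Links]
    | cons b q =>
      constructor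
      · rintro ⟨h1, h2⟩
        have := ih.1 h2
        exact ⟨⟨h1, this.1⟩, this.2⟩
      · rintro ⟨⟨h1, h2⟩, h3⟩
        exact ⟨h1, ih.2 ⟨h2, h3⟩⟩

-- ---- backfill decomposition (peeling the last path element, shifting the base) ----

theorem backfill_shift_aux (l : List String) (d : PySem.Dict String Int) (b s : Int) :
    (PySem.List.enumerate l (s + 1)).foldl (fun d p => d.insert p.2 (b + p.1 + 1)) d
      = (PySem.List.enumerate l s).foldl (fun d p => d.insert p.2 ((b + 1) + p.1 + 1)) d := by
  induction l generalizing d s with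
  | nil => simp [PySem.List.enumerate_nil]
  | cons x l ih =>
    rw [PySem.List.enumerate_cons, PySem.List.enumerate_cons]
    simp only [List.foldl_cons]
    have harith : b + (s + 1) + 1 = (b + 1) + s + 1 := by ring
    rw [harith, ih]

theorem backfill_nil (d : PySem.Dict String Int) (b : Int) : backfillA d [] b = d := by
  simp [backfillA, PySem.List.enumerate_nil]

theorem backfill_append (d : PySem.Dict String Int) (q : List String) (a : String) (b : Int) :
    backfillA d (q ++ [a]) b = backfillA (d.insert a (b + 1)) q (b + 1) := by
  unfold backfillA
  rw [List.reverse_append]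
  simp only [List.reverse_cons, List.reverse_nil, List.nil_append, List.cons_append]
  rw [PySem.List.enumerate_cons]
  simp only [List.foldl_cons]
  have h0 : b + 0 + 1 = b + 1 := by ring
  rw [h0, backfill_shift_aux]

-- unfolding lemmas for the well-founded loopB
theorem loopB_nil (m : PySem.Dict String String) (fuel : Nat) (d : PySem.Dict String Int) :
    loopB m fuel d [] = d := by
  rw [loopB.eq_def]

theorem loopB_cons (m : PySem.Dict String String) (fuel : Nat) (d : PySem.Dict String Int)
    (n : String) (rest : List String) :
    loopB m fuel d (n :: rest)
      = if d.contains n then loopB m fuel d rest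
        else match m.get? n with
          | none => loopB m fuel (d.insert n 1) rest
          | some t =>
            if d.contains t then loopB m fuel (d.insert n (d.getD t 0 + 1)) rest
            else if t ∈ n :: rest then loopB m fuel (d.insert n (d.getD t 0 + 1)) rest
            else match fuel with
              | 0 => loopB m 0 (d.insert n (d.getD t 0 + 1)) rest
              | f + 1 => loopB m f d (t :: n :: rest) := by
  rw [loopB.eq_def]

-- ---- the pop phase of B realises A's arithmetic backfill ----

theorem popL (m : PySem.Dict String String) (p : List String) :
    ∀ (d : PySem.Dict String Int) (e : String) (rest : List String) (f : Nat) (b : Int),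
    Links m p e → d.contains e = true → d.getD e 0 = b →
    (∀ x ∈ p, d.contains x = false) → p.Nodup →
    loopB m f d (p.reverse ++ rest) = loopB m f (backfillA d p b) rest := by
  induction p using List.reverseRecOn with
  | nil => intro d e rest f b _ _ _ _ _; rw [backfill_nil]; rfl
  | append_singleton q a ih =>
    intro d e rest f b hlinks hce hgd hnc hnd
    obtain ⟨hlq, hga⟩ := (links_append_singleton m q a e).1 hlinks
    have hca : d.contains a = false := hnc a (by simp)
    rw [List.reverse_append]
    simp only [List.reverse_cons, List.reverse_nil, List.nil_append, List.cons_append]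
    rw [loopB_cons]
    simp only [hca, Bool.false_eq_true, if_false, hga, hce, if_true]
    rw [hgd]
    have hnda : a ∉ q := by
      rw [List.nodup_append] at hnd
      intro hmem; exact hnd.2.2 a hmem a (by simp) rfl
    have hkey : ∀ x ∈ q, (d.insert a (b + 1)).contains x = false := by
      intro x hx
      rw [PySem.Dict.contains_insert]
      have hne : (x == a) = false := by
        simp only [beq_eq_false_iff_ne, ne_eq]
        intro h; exact hnda (h ▸ hx)
      rw [hne, hnc x (List.mem_append.2 (Or.inl hx))]
      rfl
    rw [ih (d.insert a (b + 1)) a rest f (b + 1) hlq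
        (PySem.Dict.contains_insert_self _ _ _)
        (PySem.Dict.getD_insert_self _ _ _ _)
        hkey (List.Nodup.of_append_left hnd)]
    rw [backfill_append]

-- a terminal step of B: assign c from its stop node and pop the whole prefix
theorem closeCase (m : PySem.Dict String String) (d : PySem.Dict String Int)
    (p : List String) (c : String) (rest : List String) (f : Nat) (b0 : Int)
    (hlinks : Links m p c) (hnc : ∀ x ∈ p, d.contains x = false)
    (hnd : (p ++ [c]).Nodup) :
    loopB m f (d.insert c (b0 + 1)) (p.reverse ++ rest)
      = loopB m f (backfillA d (p ++ [c]) b0) rest := by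
  have hkey : ∀ x ∈ p, (d.insert c (b0 + 1)).contains x = false := by
    intro x hx
    rw [PySem.Dict.contains_insert]
    have hnxc : x ≠ c := by
      rw [List.nodup_append] at hnd
      exact hnd.2.2 x hx c (by simp)
    have hne : (x == c) = false := by simp [hnxc]
    rw [hne, hnc x hx]
    rfl
  rw [backfill_append]
  exact popL m p (d.insert c (b0 + 1)) c rest f (b0 + 1) hlinks
    (PySem.Dict.contains_insert_self _ _ _)
    (PySem.Dict.getD_insert_self _ _ _ _)
    hkey (List.Nodup.of_append_left hnd)

-- ---- the descent of B mirrors A's walk; terminal cases close with closeCase ----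

theorem mainS (m : PySem.Dict String String) (f : Nat) :
    ∀ (d : PySem.Dict String Int) (p : List String) (c : String) (rest : List String),
    Links m p c → (∀ x ∈ p, d.contains x = false) → (p ++ [c]).Nodup →
    d.contains c = false → (∀ x ∈ rest, d.contains x = true) →
    ∃ f' ≤ f,
      loopB m f d (c :: (p.reverse ++ rest))
        = loopB m f'
            (backfillA d (walkA m (f + 1) d p (some c)).1
              (match (walkA m (f + 1) d p (some c)).2 with
               | some e => d.getD e 0 | none => 0)) rest := by
  induction f with
  | zero =>
    intro d p c rest hlinks hnc hnd hcc hrest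
    have hcp : c ∉ p := by
      rw [List.nodup_append] at hnd
      intro h; exact hnd.2.2 c h c (by simp) rfl
    refine ⟨0, le_refl _, ?_⟩
    rw [walkA]
    simp only [hcc, Bool.false_eq_true, if_false, if_neg hcp]
    rw [loopB_cons]
    simp only [hcc, Bool.false_eq_true, if_false]
    cases hg : m.get? c with
    | none =>
      rw [walkA]
      have := closeCase m d p c rest 0 0 hlinks hnc hnd
      simpa using this
    | some t =>
      rw [walkA]
      by_cases hct : d.contains t = true
      · simp only [hct, if_true]
        exact closeCase m d p c rest 0 (d.getD t 0) hlinks hnc hnd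
      · have hct' : d.contains t = false := by
          cases h : d.contains t
          · rfl
          · exact absurd h hct
        simp only [hct', Bool.false_eq_true, if_false]
        by_cases hmem : t ∈ c :: (p.reverse ++ rest)
        · have htp : t ∈ p ++ [c] := by
            rcases List.mem_cons.1 hmem with h | hmem'
            · simp [h]
            · rcases List.mem_append.1 hmem' with h | h
              · exact List.mem_append.2 (Or.inl (List.mem_reverse.1 h))
              · exact absurd (hrest t h) (by simp [hct'])
          simp only [if_pos hmem, if_pos htp]
          exact closeCase m d p c rest 0 (d.getD t 0) hlinks hnc hnd
        · have htp : t ∉ p ++ [c] := by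
            intro h
            apply hmem
            rcases List.mem_append.1 h with h | h
            · exact List.mem_cons_of_mem _ (List.mem_append.2 (Or.inl (List.mem_reverse.2 h)))
            · simp at h; simp [h]
          simp only [if_neg hmem, if_neg htp]
          exact closeCase m d p c rest 0 (d.getD t 0) hlinks hnc hnd
  | succ g ih =>
    intro d p c rest hlinks hnc hnd hcc hrest
    have hcp : c ∉ p := by
      rw [List.nodup_append] at hnd
      intro h; exact hnd.2.2 c h c (by simp) rfl
    rw [walkA]
    simp only [hcc, Bool.false_eq_true, if_false, if_neg hcp]
    rw [loopB_cons]
    simp only [hcc, Bool.false_eq_true, if_false]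
    cases hg : m.get? c with
    | none =>
      refine ⟨g + 1, le_refl _, ?_⟩
      rw [walkA]
      have := closeCase m d p c rest (g + 1) 0 hlinks hnc hnd
      simpa using this
    | some t =>
      rw [walkA]
      by_cases hct : d.contains t = true
      · refine ⟨g + 1, le_refl _, ?_⟩
        simp only [hct, if_true]
        exact closeCase m d p c rest (g + 1) (d.getD t 0) hlinks hnc hnd
      · have hct' : d.contains t = false := by
          cases h : d.contains t
          · rfl
          · exact absurd h hct
        simp only [hct', Bool.false_eq_true, if_false]
        by_cases hmem : t ∈ c :: (p.reverse ++ rest)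
        · have htp : t ∈ p ++ [c] := by
            rcases List.mem_cons.1 hmem with h | hmem'
            · simp [h]
            · rcases List.mem_append.1 hmem' with h | h
              · exact List.mem_append.2 (Or.inl (List.mem_reverse.1 h))
              · exact absurd (hrest t h) (by simp [hct'])
          refine ⟨g + 1, le_refl _, ?_⟩
          simp only [if_pos hmem, if_pos htp]
          exact closeCase m d p c rest (g + 1) (d.getD t 0) hlinks hnc hnd
        · have htp : t ∉ p ++ [c] := by
            intro h
            apply hmem
            rcases List.mem_append.1 h with h | h
            · exact List.mem_cons_of_mem _ (List.mem_append.2 (Or.inl (List.mem_reverse.2 h)))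
            · simp at h; simp [h]
          simp only [if_neg hmem, if_neg htp]
          -- push t and use the induction hypothesis at p ++ [c]
          have hlinks' : Links m (p ++ [c]) t := (links_append_singleton m p c t).2 ⟨hlinks, hg⟩
          have hnc' : ∀ x ∈ p ++ [c], d.contains x = false := by
            intro x hx
            rcases List.mem_append.1 hx with h | h
            · exact hnc x h
            · simp at h; subst h; exact hcc
          have hnd' : ((p ++ [c]) ++ [t]).Nodup := by
            rw [List.nodup_append]
            refine ⟨hnd, List.nodup_singleton t, ?_⟩
            intro a ha b hb
            simp at hb
            subst hb
            intro h; exact htp (h ▸ ha)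
          obtain ⟨f', hf', heq⟩ := ih d (p ++ [c]) t rest hlinks' hnc' hnd' hct' hrest
          refine ⟨f', Nat.le_succ_of_le hf', ?_⟩
          have hstack : t :: ((p ++ [c]).reverse ++ rest) = t :: c :: (p.reverse ++ rest) := by
            rw [List.reverse_append]
            simp
          have hw : walkA m (g + 1) d (p ++ [c]) (some t)
              = walkA m g d ((p ++ [c]) ++ [t]) (m.get? t) := by
            rw [walkA]
            simp only [hct', Bool.false_eq_true, if_false, if_neg htp]
          rw [← hstack, heq, hw]

-- ---- per-start step equality, then the outer fold ----

theorem step_eq (m : PySem.Dict String String) (d : PySem.Dict String Int) (n : String) :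
    (if d.contains n then d
     else
       let r := walkA m (m.size + 2) d [] (some n)
       backfillA d r.1 (match r.2 with | some c => d.getD c 0 | none => 0))
      = loopB m (m.size + 1) d [n] := by
  by_cases hc : d.contains n = true
  · rw [if_pos hc, loopB_cons]
    simp only [hc, if_true]
    exact (loopB_nil m (m.size + 1) d).symm
  · have hc' : d.contains n = false := by
      cases h : d.contains n
      · rfl
      · exact absurd h hc
    rw [if_neg (by simp [hc'])]
    obtain ⟨f', _, heq⟩ := mainS m (m.size + 1) d [] n [] trivial (by simp) (by simp) hc' (by simp)
    simp only [List.reverse_nil, List.nil_append] at heq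
    rw [heq, loopB_nil]

theorem compute_depths_py_spec' (mapping : List (String × String))
    (cycles : Option (List (List String))) :
    compute_depths_py mapping cycles = compute_depths_py_alt mapping cycles := by
  unfold compute_depths_py compute_depths_py_alt
  simp only []
  rw [seed_eq_flatten]
  congr 1
  congr 1
  funext d start
  exact step_eq (PySem.Dict.ofList mapping) d start

-- ===== VERDICT (by name: the statement is the Claim_ definition above) =====
theorem compute_depths_py_spec : Claim_equal_compute_depths_py := by
  intro mapping cycles _
  exact compute_depths_py_spec' mapping cycles
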